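-- pv_equiv track=rewrite | github.com/Callein/Acmicpc | gold/1099_알수없는문장.py | solve
-- ===== SOURCE A (Python) =====
-- def calculate_cost(word, perm):
--     return sum(1 for x, y in zip(word, perm) if x != y)
--
-- def solve(sentence, words):
--     n = len(sentence)
--     # word_perm = defaultdict(list)
--
--     # # 각 단어의 모든 순열과 그 순열의 비용을 계산
--     # for word in words:
--     #     perms = set(permutations(word))
--     #     for perm in perms:
--     #         perm_str = ''.join(perm)
--     #         cost = calculate_cost(word, perm_str)
--     #         word_perm[word].append((perm_str, cost))
--
--     dp = [float('inf')] * (n + 1)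
--     dp[0] = 0
--
--     # 문장의 각 substring 을 순회 하며 최소 비용 계산
--     for i in range(n):
--         if dp[i] == float('inf'):
--             continue
--
--         for word in words:
--             len_word = len(word)
--             if i + len_word <= n:
--                 substr = sentence[i:i + len_word]
--                 if sorted(substr) == sorted(word):
--                     cost = calculate_cost(word, substr)
--                     dp[i + len_word] = min(dp[i + len_word], dp[i] + cost)
--
--     return dp[n] if dp[n] != float('inf') else -1
-- ===== SOURCE B (Python) =====
-- def mismatch(word, sub):
--     return sum(x != y for x, y in zip(word, sub))
--
-- def solve(sentence, words):
--     n = len(sentence)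
--     # index words by (length, sorted signature): one hash lookup per (position, length)
--     groups = {}
--     for word in words:
--         k = (len(word), ''.join(sorted(word)))
--         groups[k] = groups.get(k, []) + [word]
--     lengths = list(dict.fromkeys(len(w) for w in words))
--     dp = [None] * (n + 1)
--     dp[0] = 0
--     for i in range(n):
--         di = dp[i]
--         if di is None:
--             continue
--         for L in lengths:
--             if i + L <= n:
--                 sub = sentence[i:i + L]
--                 ws = groups.get((L, ''.join(sorted(sub))))
--                 if ws is not None:
--                     c = di + min(mismatch(w, sub) for w in ws)
--                     if dp[i + L] is None or c < dp[i + L]: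
--                         dp[i + L] = c
--     return dp[n] if dp[n] is not None else -1
-- ===== Notes on version B (the rewrite author's own statement) =====
-- stated objective: faster
-- what changed: B pre-groups the words once in a dict keyed by (length, sorted signature) and its DP inner loop runs over the distinct word lengths with one substring sort plus one dict lookup each, instead of A's inner loop over all words that re-sorts both the substring and the word for every (position, word) pair.
import Mathlib
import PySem

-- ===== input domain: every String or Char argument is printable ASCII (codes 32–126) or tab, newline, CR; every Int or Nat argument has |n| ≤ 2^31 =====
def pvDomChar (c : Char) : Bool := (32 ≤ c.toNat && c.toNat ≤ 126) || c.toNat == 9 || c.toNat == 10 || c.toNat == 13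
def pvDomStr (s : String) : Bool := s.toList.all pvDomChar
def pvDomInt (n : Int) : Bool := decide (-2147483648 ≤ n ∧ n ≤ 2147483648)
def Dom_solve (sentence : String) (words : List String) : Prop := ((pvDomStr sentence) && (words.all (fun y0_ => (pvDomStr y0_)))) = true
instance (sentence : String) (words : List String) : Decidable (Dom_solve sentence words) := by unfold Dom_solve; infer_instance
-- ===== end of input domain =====

-- B groups the words once by (length, sorted signature) in a dict, so each position does one
-- sort + one lookup per DISTINCT word length instead of two sorts per word; same DP, same values.

-- ===== PORT A =====
-- calculate_cost(word, perm) = sum(1 for x, y in zip(word, perm) if x != y)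
def calcCost (word perm : List Char) : Int :=
  (word.zip perm).foldl (fun acc xy => if xy.1 ≠ xy.2 then acc + 1 else acc) 0

-- dp[j] = min(dp[j], v), with float('inf') modelled as none (min(inf, v) = v)
def updMin (dp : List (Option Int)) (j : Nat) (v : Int) : List (Option Int) :=
  dp.set j (some (match dp.getD j none with
                  | none => v
                  | some w => min w v))

def solve (sentence : String) (words : List String) : Int :=
  let s := sentence.toList
  let n := s.length
  -- dp = [float('inf')] * (n + 1); dp[0] = 0
  let dp := (List.range n).foldl (fun dp i =>
    match dp.getD i none with        -- if dp[i] == float('inf'): continue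
    | none => dp
    | some _ =>
      words.foldl (fun dp word =>
        let w := word.toList
        let lw := w.length
        if i + lw ≤ n then
          let substr := (s.drop i).take lw   -- sentence[i:i+lw] (exact: PySem.List.slice_natCast_add)
          if PySem.List.sorted substr (fun c => c) false = PySem.List.sorted w (fun c => c) false then
            match dp.getD i none with        -- dp[i] + cost: inf + cost = inf, and min(x, inf) = x
            | none => dp
            | some d => updMin dp (i + lw) (d + calcCost w substr)
          else dp
        else dp) dp) (some 0 :: List.replicate n none)
  match dp.getD n none with          -- dp[n] if dp[n] != float('inf') else -1
  | none => -1
  | some v => v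

-- ===== PORT B =====
-- mismatch(word, sub) = sum(x != y for x, y in zip(word, sub))
def mismatch (word sub : List Char) : Int :=
  ((word.zip sub).countP (fun xy => xy.1 != xy.2) : Int)

-- key (len(word), ''.join(sorted(word)))
def sigOf (w : List Char) : Nat × List Char := (w.length, PySem.List.sorted w (fun c => c) false)

def solve_alt (sentence : String) (words : List String) : Int :=
  let s := sentence.toList
  let n := s.length
  -- groups[k] = groups.get(k, []) + [word]
  let groups : PySem.Dict (Nat × List Char) (List (List Char)) :=
    words.foldl (fun d word => d.modify (sigOf word.toList) [] (fun l => l ++ [word.toList]))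
      PySem.Dict.empty
  -- lengths = list(dict.fromkeys(len(w) for w in words))
  let lengths := PySem.List.dedup (words.map (fun w => w.toList.length))
  -- dp = [None] * (n + 1); dp[0] = 0
  let dp := (List.range n).foldl (fun dp i =>
    match dp.getD i none with        -- di = dp[i]; if di is None: continue
    | none => dp
    | some di =>
      lengths.foldl (fun dp L =>
        if i + L ≤ n then
          let sub := (s.drop i).take L       -- sentence[i:i+L]
          match groups.get? (L, PySem.List.sorted sub (fun c => c) false) with
          | none => dp
          | some ws =>
            match PySem.List.min? (ws.map (fun w => mismatch w sub)) (fun x => x) with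
            | none => dp                     -- unreachable: every stored group is nonempty
            | some m =>
              let c := di + m
              match dp.getD (i + L) none with
              | none => dp.set (i + L) (some c)
              | some v => if c < v then dp.set (i + L) (some c) else dp
        else dp) dp) (some 0 :: List.replicate n none)
  match dp.getD n none with          -- dp[n] if dp[n] is not None else -1
  | none => -1
  | some v => v

-- ===== PRECONDITION & SPEC =====
def Spec_solve (sentence : String) (words : List String) (out : Int) : Prop := out = solve_alt sentence words
instance (sentence : String) (words : List String) (out : Int) : Decidable (Spec_solve sentence words out) := by unfold Spec_solve; infer_instance

-- ===== CLAIM (what is proved, stated in full; the proofs are below) =====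
def Claim_equal_solve : Prop := ∀ (sentence : String) (words : List String), Dom_solve sentence words → Spec_solve sentence words (solve sentence words)

-- ===== LEMMAS AND PROOFS =====

-- value of one min-update on an optional cell
def ominv (o : Option Int) (v : Int) : Int :=
  match o with | none => v | some w => min w v

def updP (dp : List (Option Int)) (u : Nat × Int) : List (Option Int) := updMin dp u.1 u.2

-- apply an optional (slot, value) min-update
def applyUpd {β γ : Type} (h : γ → β → γ) (acc : γ) (u? : Option β) : γ :=
  match u? with | some u => h acc u | none => acc

def ominFold (o : Option Int) (vs : List Int) : Option Int :=
  vs.foldl (fun o v => some (ominv o v)) o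

def subAt (s : List Char) (i L : Nat) : List Char := (s.drop i).take L

def csort (w : List Char) : List Char := PySem.List.sorted w (fun c => c) false

-- the update A's inner loop performs for one word (slot, candidate value), if any
def gA (s : List Char) (n i : Nat) (di : Int) (word : String) : Option (Nat × Int) :=
  if i + word.toList.length ≤ n ∧
      csort (subAt s i word.toList.length) = csort word.toList then
    some (i + word.toList.length, di + calcCost word.toList (subAt s i word.toList.length))
  else none

def grps (words : List String) : PySem.Dict (Nat × List Char) (List (List Char)) :=
  words.foldl (fun d word => d.modify (sigOf word.toList) [] (fun l => l ++ [word.toList]))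
    PySem.Dict.empty

-- the update B's inner loop performs for one length (slot, candidate value), if any
def gB (s : List Char) (n i : Nat) (di : Int)
    (G : PySem.Dict (Nat × List Char) (List (List Char))) (L : Nat) : Option (Nat × Int) :=
  if i + L ≤ n then
    match G.get? (L, csort (subAt s i L)) with
    | none => none
    | some ws =>
      match PySem.List.min? (ws.map (fun w => mismatch w (subAt s i L))) (fun x => x) with
      | none => none
      | some m => some (i + L, di + m)
  else none

lemma calcCost_eq (w p : List Char) : calcCost w p = mismatch w p := by
  unfold calcCost mismatch
  rw [PySem.List.foldl_ite_add_one]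
  have : (fun (xy : Char × Char) => decide ¬(xy.1 = xy.2)) = (fun (xy : Char × Char) => xy.1 != xy.2) := by
    funext xy; by_cases h : xy.1 = xy.2 <;> simp [h]
  rw [this]; ring

lemma mismatch_nonneg (w p : List Char) : 0 ≤ mismatch w p := by
  unfold mismatch; exact Int.natCast_nonneg _

lemma length_updMin (dp : List (Option Int)) (j : Nat) (v : Int) :
    (updMin dp j v).length = dp.length := by
  simp [updMin]

lemma getD_updMin_self (dp : List (Option Int)) (j : Nat) (v : Int) (hj : j < dp.length) :
    (updMin dp j v).getD j none = some (ominv (dp.getD j none) v) := by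
  unfold updMin ominv
  rw [List.getD_eq_getElem?_getD, List.getElem?_set_self hj]
  rfl

lemma getD_updMin_ne (dp : List (Option Int)) (j k : Nat) (v : Int) (h : k ≠ j) :
    (updMin dp j v).getD k none = dp.getD k none := by
  unfold updMin
  rw [List.getD_eq_getElem?_getD, List.getElem?_set_ne (Ne.symm h), ← List.getD_eq_getElem?_getD]

lemma getD_some_lt (dp : List (Option Int)) (j : Nat) (v : Int)
    (h : dp.getD j none = some v) : j < dp.length := by
  by_contra hge
  rw [List.getD_eq_getElem?_getD, List.getElem?_eq_none (by omega)] at h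
  simp at h

lemma set_getD_eq (dp : List (Option Int)) (j : Nat) (v : Option Int)
    (hj : j < dp.length) (h : dp.getD j none = v) : dp.set j v = dp := by
  have hj' : dp[j]? = some dp[j] := List.getElem?_eq_getElem hj
  rw [List.getD_eq_getElem?_getD, hj'] at h
  simp only [Option.getD_some] at h
  apply List.ext_getElem?
  intro k
  by_cases hk : k = j
  · subst hk; rw [List.getElem?_set_self hj, hj', h]
  · rw [List.getElem?_set_ne (Ne.symm hk)]

lemma updB_eq (dp : List (Option Int)) (j : Nat) (c : Int) (hj : j < dp.length) :
    (match dp.getD j none with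
     | none => dp.set j (some c)
     | some v => if c < v then dp.set j (some c) else dp) = updMin dp j c := by
  cases h : dp.getD j none with
  | none => unfold updMin; rw [h]
  | some v =>
    unfold updMin
    rw [h]
    show (if c < v then dp.set j (some c) else dp) = dp.set j (some (min v c))
    by_cases hc : c < v
    · rw [if_pos hc, min_eq_right (le_of_lt hc)]
    · rw [if_neg hc, min_eq_left (by omega)]
      exact (set_getD_eq dp j (some v) hj h).symm

lemma length_foldl_updP (us : List (Nat × Int)) :
    ∀ dp : List (Option Int), (us.foldl updP dp).length = dp.length := by
  induction us with
  | nil => intro dp; rfl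
  | cons u us ih =>
    intro dp
    rw [List.foldl_cons, ih]
    simp [updP, length_updMin]

-- a loop whose body is "if g x yields an update, apply h, else skip", with invariant P
lemma foldl_convert {α β γ : Type} (P : γ → Prop) (step : γ → α → γ) (g : α → Option β)
    (h : γ → β → γ)
    (hstep : ∀ acc x, P acc → step acc x = applyUpd h acc (g x))
    (hpres : ∀ acc x, P acc → P (applyUpd h acc (g x))) :
    ∀ (xs : List α) (init : γ), P init →
      xs.foldl step init = (xs.filterMap g).foldl h init ∧ P (xs.foldl step init) := by
  intro xs
  induction xs with
  | nil => intro init hP; exact ⟨rfl, hP⟩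
  | cons x xs ih =>
    intro init hP
    rw [List.foldl_cons, List.filterMap_cons, hstep _ _ hP]
    have hP' := hpres init x hP
    cases hg : g x with
    | none => rw [hg] at hP'; exact ih _ hP'
    | some u => rw [hg] at hP'; exact ih _ hP'

-- pointwise characterisation of a fold of min-updates
lemma getD_foldl_updP (us : List (Nat × Int)) :
    ∀ (dp : List (Option Int)) (j : Nat), (∀ u ∈ us, u.1 < dp.length) →
      (us.foldl updP dp).getD j none =
        ominFold (dp.getD j none) ((us.filter (fun u => u.1 == j)).map (·.2)) := by
  induction us with
  | nil => intro dp j _; rfl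
  | cons u us ih =>
    intro dp j h
    rw [List.foldl_cons]
    have hlen : (updP dp u).length = dp.length := by simp [updP, length_updMin]
    have hrec := ih (updP dp u) j (by intro v hv; rw [hlen]; exact h v (List.mem_cons_of_mem _ hv))
    rw [hrec]
    by_cases hj : u.1 = j
    · have hlt : j < dp.length := hj ▸ h u List.mem_cons_self
      have hself : (updP dp u).getD j none = some (ominv (dp.getD j none) u.2) := by
        rw [updP, ← hj]; exact getD_updMin_self dp u.1 u.2 (hj ▸ hlt)
      rw [hself, List.filter_cons_of_pos (by simp [hj]), List.map_cons]
      rfl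
    · have hne : (updP dp u).getD j none = dp.getD j none := getD_updMin_ne dp u.1 j u.2 (Ne.symm hj)
      rw [hne, List.filter_cons_of_neg (by simp [hj])]

lemma foldl_min_min (l : List Int) :
    ∀ a b : Int, l.foldl min (min a b) = min a (l.foldl min b) := by
  induction l with
  | nil => intro a b; rfl
  | cons c l ih =>
    intro a b
    rw [List.foldl_cons, List.foldl_cons, min_assoc, ih]

lemma ominFold_min (ct : List Int) :
    ∀ (c0 : Int) (o : Option Int) (d : Int),
      ominFold o ((c0 :: ct).map (fun c => d + c)) = some (ominv o (d + ct.foldl min c0)) := by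
  induction ct with
  | nil => intro c0 o d; rfl
  | cons c1 ct ih =>
    intro c0 o d
    show ominFold (some (ominv o (d + c0))) ((c1 :: ct).map (fun c => d + c)) = _
    rw [ih]
    rw [List.foldl_cons, foldl_min_min]
    congr 1
    unfold ominv
    cases o with
    | none => simp only; omega
    | some w => simp only; omega

lemma grps_getD (words : List String) (c : Nat × List Char) :
    (grps words).getD c [] = (words.map String.toList).filter (fun w => sigOf w == c) := by
  unfold grps
  have hmap : (words.foldl (fun d word => d.modify (sigOf word.toList) [] (fun l => l ++ [word.toList])) PySem.Dict.empty)
      = ((words.map (fun word => (sigOf word.toList, word.toList))).foldl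
          (fun d p => d.modify p.1 [] (fun l => l ++ [p.2])) PySem.Dict.empty) := by
    rw [List.foldl_map]
  rw [hmap, PySem.Dict.getD_foldl_modify_append]
  simp only [List.filter_map, List.map_map]
  rfl

lemma gA_mem (s : List Char) (n i : Nat) (di : Int) (words : List String)
    (u : Nat × Int) (hu : u ∈ words.filterMap (gA s n i di)) : i ≤ u.1 ∧ u.1 ≤ n := by
  rw [List.mem_filterMap] at hu
  obtain ⟨word, _, hg⟩ := hu
  unfold gA at hg
  split at hg
  · rename_i hc
    cases hg
    exact ⟨by omega, hc.1⟩
  · cases hg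

lemma gB_slot (s : List Char) (n i : Nat) (di : Int) (G : PySem.Dict (Nat × List Char) (List (List Char)))
    (L : Nat) (u : Nat × Int) (h : gB s n i di G L = some u) : u.1 = i + L ∧ i + L ≤ n := by
  unfold gB at h
  split at h
  · rename_i hle
    split at h
    · cases h
    · split at h
      · cases h
      · cases h; exact ⟨rfl, hle⟩
  · cases h

-- A's inner loop over the words, converted to a fold of min-updates (dp[i] stays = di)
lemma innerA (s : List Char) (n i : Nat) (di : Int) (words : List String)
    (dp : List (Option Int)) (h : dp.getD i none = some di) (hlen : dp.length = n + 1) :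
    (words.foldl (fun dp word =>
        if i + word.toList.length ≤ n then
          if PySem.List.sorted ((s.drop i).take word.toList.length) (fun c => c) false =
              PySem.List.sorted word.toList (fun c => c) false then
            match dp.getD i none with
            | none => dp
            | some d => updMin dp (i + word.toList.length)
                (d + calcCost word.toList ((s.drop i).take word.toList.length))
          else dp
        else dp) dp) = (words.filterMap (gA s n i di)).foldl updP dp := by
  have hstep : ∀ (acc : List (Option Int)) (word : String),
      (acc.getD i none = some di ∧ acc.length = n + 1) →
      (if i + word.toList.length ≤ n then
          if PySem.List.sorted ((s.drop i).take word.toList.length) (fun c => c) false =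
              PySem.List.sorted word.toList (fun c => c) false then
            match acc.getD i none with
            | none => acc
            | some d => updMin acc (i + word.toList.length)
                (d + calcCost word.toList ((s.drop i).take word.toList.length))
          else acc
        else acc) =
      applyUpd updP acc (gA s n i di word) := by
    intro acc word hP
    obtain ⟨h1, h2⟩ := hP
    by_cases hle : i + word.toList.length ≤ n
    · by_cases hs : PySem.List.sorted ((s.drop i).take word.toList.length) (fun c => c) false =
          PySem.List.sorted word.toList (fun c => c) false
      · have hg : gA s n i di word = some (i + word.toList.length,
            di + calcCost word.toList ((s.drop i).take word.toList.length)) := by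
          unfold gA csort subAt; rw [if_pos ⟨hle, hs⟩]
        rw [if_pos hle, if_pos hs, h1, hg]
        rfl
      · have hg : gA s n i di word = none := by
          unfold gA csort subAt; rw [if_neg (by tauto)]
        rw [if_pos hle, if_neg hs, hg]
        rfl
    · have hg : gA s n i di word = none := by
        unfold gA csort subAt; rw [if_neg (by tauto)]
      rw [if_neg hle, hg]
      rfl
  have hpres : ∀ (acc : List (Option Int)) (word : String),
      (acc.getD i none = some di ∧ acc.length = n + 1) →
      ((applyUpd updP acc (gA s n i di word)).getD i none = some di ∧
        (applyUpd updP acc (gA s n i di word)).length = n + 1) := by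
    intro acc word hP
    obtain ⟨h1, h2⟩ := hP
    cases hg : gA s n i di word with
    | none => exact ⟨h1, h2⟩
    | some u =>
      have hu : u = (i + word.toList.length,
          di + calcCost word.toList (subAt s i word.toList.length)) := by
        unfold gA at hg
        split at hg
        · cases hg; rfl
        · cases hg
      constructor
      · show (updP acc u).getD i none = some di
        rw [hu]
        simp only [updP]
        by_cases hlw : word.toList.length = 0
        · have hi : i < acc.length := getD_some_lt acc i di h1
          have hslot : i + word.toList.length = i := by omega
          rw [hslot, getD_updMin_self acc i _ hi, h1]
          have hc0 : 0 ≤ calcCost word.toList (subAt s i word.toList.length) := by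
            rw [calcCost_eq]; exact mismatch_nonneg _ _
          unfold ominv
          simp only
          congr 1
          omega
        · rw [getD_updMin_ne acc _ i _ (by omega)]
          exact h1
      · show (updP acc u).length = n + 1
        simp [updP, length_updMin, h2]
  exact (foldl_convert (fun dp => dp.getD i none = some di ∧ dp.length = n + 1) _ (gA s n i di) updP hstep hpres words dp ⟨h, hlen⟩).1

-- B's inner loop over the distinct lengths, converted to a fold of min-updates
lemma innerB (s : List Char) (n i : Nat) (di : Int)
    (G : PySem.Dict (Nat × List Char) (List (List Char))) (ls : List Nat)
    (dp : List (Option Int)) (hlen : dp.length = n + 1) :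
    (ls.foldl (fun dp L =>
        if i + L ≤ n then
          match G.get? (L, PySem.List.sorted ((s.drop i).take L) (fun c => c) false) with
          | none => dp
          | some ws =>
            match PySem.List.min? (ws.map (fun w => mismatch w ((s.drop i).take L))) (fun x => x) with
            | none => dp
            | some m =>
              match dp.getD (i + L) none with
              | none => dp.set (i + L) (some (di + m))
              | some v => if di + m < v then dp.set (i + L) (some (di + m)) else dp
        else dp) dp) = (ls.filterMap (gB s n i di G)).foldl updP dp := by
  have hstep : ∀ (acc : List (Option Int)) (L : Nat), acc.length = n + 1 →
      (if i + L ≤ n then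
          match G.get? (L, PySem.List.sorted ((s.drop i).take L) (fun c => c) false) with
          | none => acc
          | some ws =>
            match PySem.List.min? (ws.map (fun w => mismatch w ((s.drop i).take L))) (fun x => x) with
            | none => acc
            | some m =>
              match acc.getD (i + L) none with
              | none => acc.set (i + L) (some (di + m))
              | some v => if di + m < v then acc.set (i + L) (some (di + m)) else acc
        else acc) =
      applyUpd updP acc (gB s n i di G L) := by
    intro acc L hP
    unfold gB csort subAt
    by_cases hle : i + L ≤ n
    · rw [if_pos hle, if_pos hle]
      cases hq : G.get? (L, PySem.List.sorted ((s.drop i).take L) (fun c => c) false) with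
      | none => rfl
      | some ws =>
        show (match PySem.List.min? (ws.map (fun w => mismatch w ((s.drop i).take L))) (fun x => x) with
          | none => acc
          | some m =>
            match acc.getD (i + L) none with
            | none => acc.set (i + L) (some (di + m))
            | some v => if di + m < v then acc.set (i + L) (some (di + m)) else acc) =
          applyUpd updP acc (match PySem.List.min? (ws.map (fun w => mismatch w ((s.drop i).take L))) (fun x => x) with
            | none => none
            | some m => some (i + L, di + m))
        cases hm : PySem.List.min? (ws.map (fun w => mismatch w ((s.drop i).take L))) (fun x => x) with
        | none => rfl
        | some m => exact updB_eq acc (i + L) (di + m) (by omega)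
    · rw [if_neg hle, if_neg hle]
      rfl
  have hpres : ∀ (acc : List (Option Int)) (L : Nat), acc.length = n + 1 →
      ((applyUpd updP acc (gB s n i di G L)).length = n + 1) := by
    intro acc L hP
    cases hg : gB s n i di G L with
    | none => exact hP
    | some u => show (updP acc u).length = n + 1; simp [updP, length_updMin, hP]
  exact (foldl_convert (fun dp : List (Option Int) => dp.length = n + 1) _ (gB s n i di G) updP hstep hpres ls dp hlen).1

-- the per-slot candidate list of A's loop, at slot i + L0
lemma A_vals (s : List Char) (n i L0 : Nat) (di : Int) (words : List String)
    (hL0 : i + L0 ≤ n) :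
    (((words.filterMap (gA s n i di)).filter (fun u => u.1 == i + L0)).map (·.2)) =
      ((words.map String.toList).filter
          (fun w => sigOf w == (L0, csort (subAt s i L0)))).map
        (fun w => di + mismatch w (subAt s i L0)) := by
  induction words with
  | nil => rfl
  | cons word ws ih =>
    rw [List.filterMap_cons, List.map_cons, List.filter_cons]
    by_cases hlw : word.toList.length = L0
    · by_cases hs : csort (subAt s i L0) = csort word.toList
      · have hg : gA s n i di word = some (i + L0,
            di + calcCost word.toList (subAt s i L0)) := by
          unfold gA
          rw [hlw, if_pos ⟨hL0, hs⟩]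
        have hsigeq : sigOf word.toList = (L0, csort (subAt s i L0)) := by
          unfold sigOf csort at *
          rw [hlw, hs.symm]
        have hsig : (sigOf word.toList == (L0, csort (subAt s i L0))) = true := by
          rw [hsigeq]; simp
        rw [hg, hsig, List.filter_cons_of_pos (by simp), List.map_cons, ih, if_pos rfl,
          List.map_cons, calcCost_eq]
      · have hg : gA s n i di word = none := by
          unfold gA
          rw [hlw, if_neg (by tauto)]
        have hsig : (sigOf word.toList == (L0, csort (subAt s i L0))) = false := by
          rw [beq_eq_false_iff_ne]
          unfold sigOf csort at *
          rw [hlw]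
          intro hcontra
          exact hs (congrArg Prod.snd hcontra).symm
        rw [hg, hsig, ih, if_neg (by simp)]
    · have hsig : (sigOf word.toList == (L0, csort (subAt s i L0))) = false := by
        rw [beq_eq_false_iff_ne]
        unfold sigOf
        intro hcontra
        exact hlw (congrArg Prod.fst hcontra)
      rw [hsig]
      cases hg : gA s n i di word with
      | none => rw [ih, if_neg (by simp)]
      | some u =>
        have hu1 : u.1 = i + word.toList.length := by
          unfold gA at hg
          split at hg
          · cases hg; rfl
          · cases hg
        have hne : (u.1 == i + L0) = false := by
          rw [hu1, beq_eq_false_iff_ne]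
          omega
        rw [List.filter_cons_of_neg (by rw [hne]; simp), ih, if_neg (by simp)]

-- the per-slot candidate list of B's loop, at slot i + L0
lemma B_vals (s : List Char) (n i L0 : Nat) (di : Int)
    (G : PySem.Dict (Nat × List Char) (List (List Char))) (ls : List Nat) (hnd : ls.Nodup) :
    (((ls.filterMap (gB s n i di G)).filter (fun u => u.1 == i + L0)).map (·.2)) =
      if L0 ∈ ls then ((gB s n i di G L0).map (·.2)).toList else [] := by
  induction ls with
  | nil => rfl
  | cons L ls ih =>
    obtain ⟨hL, hnd'⟩ := List.nodup_cons.mp hnd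
    rw [List.filterMap_cons]
    by_cases hLL : L = L0
    · subst hLL
      cases hg : gB s n i di G L with
      | none =>
        rw [ih hnd']
        by_cases hmem : L ∈ ls
        · exact absurd hmem hL
        · simp [hmem]
      | some u =>
        obtain ⟨hu1, _⟩ := gB_slot s n i di G L u hg
        rw [List.filter_cons_of_pos (by simp [hu1]), List.map_cons, ih hnd',
          if_neg hL, if_pos List.mem_cons_self]
        rfl
    · have hne : ¬ L0 = L := fun hcontra => hLL hcontra.symm
      cases hg : gB s n i di G L with
      | none =>
        rw [ih hnd']
        simp [List.mem_cons, hne]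
      | some u =>
        obtain ⟨hu1, _⟩ := gB_slot s n i di G L u hg
        have hfu : (u.1 == i + L0) = false := by
          rw [hu1, beq_eq_false_iff_ne]
          omega
        rw [List.filter_cons_of_neg (by rw [hfu]; simp), ih hnd']
        simp [List.mem_cons, hne]

lemma ext_of_getD (l1 l2 : List (Option Int)) (hlen : l1.length = l2.length)
    (h : ∀ j, l1.getD j none = l2.getD j none) : l1 = l2 := by
  apply List.ext_getElem?
  intro k
  by_cases hk : k < l1.length
  · have hk2 : k < l2.length := hlen ▸ hk
    have h1 : l1[k]? = some l1[k] := List.getElem?_eq_getElem hk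
    have h2 : l2[k]? = some l2[k] := List.getElem?_eq_getElem hk2
    have hkk := h k
    rw [List.getD_eq_getElem?_getD, List.getD_eq_getElem?_getD, h1, h2] at hkk
    simp only [Option.getD_some] at hkk
    rw [h1, h2, hkk]
  · rw [List.getElem?_eq_none (by omega), List.getElem?_eq_none (by omega)]

-- at every slot, A's candidates and B's aggregated candidate have the same min-fold
lemma slotEq (s : List Char) (n i : Nat) (di : Int) (words : List String) (j : Nat)
    (o : Option Int) :
    ominFold o (((words.filterMap (gA s n i di)).filter (fun u => u.1 == j)).map (·.2)) =
      ominFold o ((((PySem.List.dedup (words.map (fun w => w.toList.length))).filterMap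
          (gB s n i di (grps words))).filter (fun u => u.1 == j)).map (·.2)) := by
  by_cases hij : i ≤ j ∧ j ≤ n
  · obtain ⟨h1, h2⟩ := hij
    have hj : j = i + (j - i) := by omega
    rw [hj, A_vals s n i (j - i) di words (by omega),
      B_vals s n i (j - i) di (grps words) _ (PySem.List.nodup_dedup _)]
    have hg := grps_getD words ((j - i), csort (subAt s i (j - i)))
    cases hq : (grps words).get? ((j - i), csort (subAt s i (j - i))) with
    | none =>
      have hM : (words.map String.toList).filter
          (fun w => sigOf w == ((j - i), csort (subAt s i (j - i)))) = [] := by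
        rw [← hg]
        exact PySem.Dict.getD_of_get?_eq_none (grps words) [] hq
      have hgB : gB s n i di (grps words) (j - i) = none := by
        unfold gB
        rw [if_pos (by omega), hq]
      rw [hM, List.map_nil, hgB]
      simp
    | some ws =>
      have hws : ws = (words.map String.toList).filter
          (fun w => sigOf w == ((j - i), csort (subAt s i (j - i)))) := by
        rw [← hg]
        exact (PySem.Dict.getD_of_get?_eq_some (grps words) [] hq).symm
      cases hMcase : (words.map String.toList).filter
          (fun w => sigOf w == ((j - i), csort (subAt s i (j - i)))) with
      | nil =>
        have hgB : gB s n i di (grps words) (j - i) = none := by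
          unfold gB
          rw [if_pos (by omega), hq, hws.trans hMcase]
          rfl
        rw [hgB, List.map_nil]
        simp
      | cons w0 t =>
        have hw0 : w0 ∈ (words.map String.toList).filter
            (fun w => sigOf w == ((j - i), csort (subAt s i (j - i)))) := by
          rw [hMcase]; exact List.mem_cons_self
        have hw0len : w0.length = j - i := by
          have hf := (List.mem_filter.mp hw0).2
          rw [beq_iff_eq] at hf
          exact congrArg Prod.fst hf
        have hL0mem : (j - i) ∈ PySem.List.dedup (words.map (fun w => w.toList.length)) := by
          rw [PySem.List.mem_dedup]
          have hm := (List.mem_filter.mp hw0).1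
          rw [List.mem_map] at hm
          obtain ⟨word, hword, hweq⟩ := hm
          rw [List.mem_map]
          exact ⟨word, hword, by rw [hweq, hw0len]⟩
        have hgB : gB s n i di (grps words) (j - i) = some (i + (j - i),
            di + (t.map (fun w => mismatch w (subAt s i (j - i)))).foldl min
              (mismatch w0 (subAt s i (j - i)))) := by
          unfold gB
          rw [if_pos (by omega), hq, hws.trans hMcase]
          show (match PySem.List.min? ((w0 :: t).map (fun w => mismatch w (subAt s i (j - i)))) (fun x => x) with
            | none => none
            | some m => some (i + (j - i), di + m)) = _
          rw [List.map_cons, PySem.List.min?_id_cons]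
        rw [hgB, if_pos hL0mem]
        simp only [Option.map_some, Option.toList_some, List.map_cons]
        have key := ominFold_min (t.map (fun w => mismatch w (subAt s i (j - i))))
          (mismatch w0 (subAt s i (j - i))) o di
        simp only [List.map_cons, List.map_map] at key
        rw [show ((fun c => di + c) ∘ fun w => mismatch w (subAt s i (j - i))) =
            (fun w => di + mismatch w (subAt s i (j - i))) from rfl] at key
        rw [key]
        rfl
  · have hA : ((words.filterMap (gA s n i di)).filter (fun u => u.1 == j)) = [] := by
      rw [List.filter_eq_nil_iff]
      intro u hu
      have := gA_mem s n i di words u hu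
      simp only [beq_iff_eq]
      omega
    have hB : (((PySem.List.dedup (words.map (fun w => w.toList.length))).filterMap
        (gB s n i di (grps words))).filter (fun u => u.1 == j)) = [] := by
      rw [List.filter_eq_nil_iff]
      intro u hu
      rw [List.mem_filterMap] at hu
      obtain ⟨L, _, hgx⟩ := hu
      obtain ⟨hu1, hle⟩ := gB_slot s n i di (grps words) L u hgx
      simp only [beq_iff_eq]
      omega
    rw [hA, hB]

-- one outer step of A equals one outer step of B (and A's step keeps the dp length)
lemma stepEq (s : List Char) (n : Nat) (words : List String) (dp : List (Option Int))
    (i : Nat) (hlen : dp.length = n + 1) :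
    ((match dp.getD i none with
      | none => dp
      | some _ => words.foldl (fun dp word =>
          if i + word.toList.length ≤ n then
            if PySem.List.sorted ((s.drop i).take word.toList.length) (fun c => c) false =
                PySem.List.sorted word.toList (fun c => c) false then
              match dp.getD i none with
              | none => dp
              | some d => updMin dp (i + word.toList.length)
                  (d + calcCost word.toList ((s.drop i).take word.toList.length))
            else dp
          else dp) dp) : List (Option Int)) =
    ((match dp.getD i none with
      | none => dp
      | some di => (PySem.List.dedup (words.map (fun w => w.toList.length))).foldl (fun dp L =>
          if i + L ≤ n then
            match (grps words).get? (L, PySem.List.sorted ((s.drop i).take L) (fun c => c) false) with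
            | none => dp
            | some ws =>
              match PySem.List.min? (ws.map (fun w => mismatch w ((s.drop i).take L))) (fun x => x) with
              | none => dp
              | some m =>
                match dp.getD (i + L) none with
                | none => dp.set (i + L) (some (di + m))
                | some v => if di + m < v then dp.set (i + L) (some (di + m)) else dp
          else dp) dp) : List (Option Int))
    ∧ ((match dp.getD i none with
      | none => dp
      | some _ => words.foldl (fun dp word =>
          if i + word.toList.length ≤ n then
            if PySem.List.sorted ((s.drop i).take word.toList.length) (fun c => c) false =
                PySem.List.sorted word.toList (fun c => c) false then
              match dp.getD i none with
              | none => dp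
              | some d => updMin dp (i + word.toList.length)
                  (d + calcCost word.toList ((s.drop i).take word.toList.length))
            else dp
          else dp) dp) : List (Option Int)).length = n + 1 := by
  cases h : dp.getD i none with
  | none => exact ⟨rfl, hlen⟩
  | some di =>
    have hA := innerA s n i di words dp h hlen
    have hB := innerB s n i di (grps words)
      (PySem.List.dedup (words.map (fun w => w.toList.length))) dp hlen
    have hlenA : ((words.filterMap (gA s n i di)).foldl updP dp).length = n + 1 := by
      rw [length_foldl_updP, hlen]
    show (words.foldl (fun dp word =>
          if i + word.toList.length ≤ n then
            if PySem.List.sorted ((s.drop i).take word.toList.length) (fun c => c) false =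
                PySem.List.sorted word.toList (fun c => c) false then
              match dp.getD i none with
              | none => dp
              | some d => updMin dp (i + word.toList.length)
                  (d + calcCost word.toList ((s.drop i).take word.toList.length))
            else dp
          else dp) dp =
      (PySem.List.dedup (words.map (fun w => w.toList.length))).foldl (fun dp L =>
          if i + L ≤ n then
            match (grps words).get? (L, PySem.List.sorted ((s.drop i).take L) (fun c => c) false) with
            | none => dp
            | some ws =>
              match PySem.List.min? (ws.map (fun w => mismatch w ((s.drop i).take L))) (fun x => x) with
              | none => dp
              | some m =>
                match dp.getD (i + L) none with
                | none => dp.set (i + L) (some (di + m))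
                | some v => if di + m < v then dp.set (i + L) (some (di + m)) else dp
          else dp) dp)
      ∧ ((words.foldl (fun dp word =>
          if i + word.toList.length ≤ n then
            if PySem.List.sorted ((s.drop i).take word.toList.length) (fun c => c) false =
                PySem.List.sorted word.toList (fun c => c) false then
              match dp.getD i none with
              | none => dp
              | some d => updMin dp (i + word.toList.length)
                  (d + calcCost word.toList ((s.drop i).take word.toList.length))
            else dp
          else dp) dp).length = n + 1)
    rw [hA, hB]
    refine ⟨?_, hlenA⟩
    apply ext_of_getD
    · rw [hlenA, length_foldl_updP, hlen]
    · intro j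
      rw [getD_foldl_updP _ dp j (by
          intro u hu
          have := gA_mem s n i di words u hu
          omega),
        getD_foldl_updP _ dp j (by
          intro u hu
          rw [List.mem_filterMap] at hu
          obtain ⟨L, _, hgx⟩ := hu
          obtain ⟨hu1, hle⟩ := gB_slot s n i di (grps words) L u hgx
          omega)]
      exact slotEq s n i di words j (dp.getD j none)

lemma outerEq (s : List Char) (n : Nat) (words : List String) (is : List Nat) :
    ∀ dp : List (Option Int), dp.length = n + 1 →
    (is.foldl (fun dp i =>
      match dp.getD i none with
      | none => dp
      | some _ => words.foldl (fun dp word =>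
          if i + word.toList.length ≤ n then
            if PySem.List.sorted ((s.drop i).take word.toList.length) (fun c => c) false =
                PySem.List.sorted word.toList (fun c => c) false then
              match dp.getD i none with
              | none => dp
              | some d => updMin dp (i + word.toList.length)
                  (d + calcCost word.toList ((s.drop i).take word.toList.length))
            else dp
          else dp) dp) dp) =
    (is.foldl (fun dp i =>
      match dp.getD i none with
      | none => dp
      | some di => (PySem.List.dedup (words.map (fun w => w.toList.length))).foldl (fun dp L =>
          if i + L ≤ n then
            match (grps words).get? (L, PySem.List.sorted ((s.drop i).take L) (fun c => c) false) with
            | none => dp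
            | some ws =>
              match PySem.List.min? (ws.map (fun w => mismatch w ((s.drop i).take L))) (fun x => x) with
              | none => dp
              | some m =>
                match dp.getD (i + L) none with
                | none => dp.set (i + L) (some (di + m))
                | some v => if di + m < v then dp.set (i + L) (some (di + m)) else dp
          else dp) dp) dp) := by
  induction is with
  | nil => intro dp _; rfl
  | cons i is ih =>
    intro dp hlen
    simp only [List.foldl_cons]
    have h := stepEq s n words dp i hlen
    rw [h.1]
    exact ih _ (h.1 ▸ h.2)

-- ===== VERDICT (by name: the statement is the Claim_ definition above) =====
theorem solve_spec : Claim_equal_solve := by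
  intro sentence words _
  show solve sentence words = solve_alt sentence words
  have h := outerEq sentence.toList sentence.toList.length words
    (List.range sentence.toList.length) (some 0 :: List.replicate sentence.toList.length none)
    (by simp)
  simp only [grps] at h
  simp only [solve, solve_alt]
  rw [h]
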